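-- pv_equiv track=rewrite | github.com/andyljones/boardlaw | pavlov/stats/monitoring.py | treeformat
-- ===== SOURCE A (Python) =====
-- def _insert(tree, path, val):
--     if len(path) == 1:
--         tree[path[0]] = val
--     else:
--         if path[0] not in tree:
--             tree[path[0]] = {}
--         _insert(tree[path[0]], path[1:], val)
--
-- def _traverse(tree, depth=0):
--     for k in sorted(tree):
--         v = tree[k]
--         if isinstance(v, dict):
--             yield depth, f'{k}.', ''
--             yield from _traverse(v, depth+1)
--         else:
--             yield depth, k, v
--
-- def treeformat(pairs):
--     if len(pairs) == 0:
--         return 'No stats yet'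
--
--     tree = {}
--     for k, v in pairs:
--         _insert(tree, k.split('.'), v)
--
--     keys, vals = [], []
--     for depth, k, v in _traverse(tree):
--         keys.append(' '*depth + k)
--         vals.append(v)
--
--     keylen = max(map(len, keys))
--     keys = [k + ' '*max(keylen-len(k), 0) for k in keys]
--
--     return '\n'.join(f'{k} {v}' for k, v in zip(keys, vals))
-- ===== SOURCE B (Python) =====
-- def treeformat(pairs):
--     if len(pairs) == 0:
--         return 'No stats yet'
--
--     # surviving leaves: a pair survives iff no later pair's dotted path is a
--     # (non-strict) prefix of its path (a later equal key overwrites it, a later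
--     # shorter key replaces its whole subtree)
--     items = [(k.split('.'), v) for k, v in pairs]
--     leaves = []
--     for i, (p, v) in enumerate(items):
--         if not any(q == p[:len(q)] for q, _ in items[i + 1:]):
--             leaves.append((p, v))
--
--     # lexicographically sorted leaf paths are exactly the sorted-DFS order;
--     # emit header rows for the components beyond the common prefix with the
--     # previous path
--     rows = []
--     prev = []
--     for p, v in sorted(leaves, key=lambda pv: pv[0]):
--         c = 0
--         while c < len(prev) and c < len(p) - 1 and prev[c] == p[c]:
--             c += 1
--         for d in range(c, len(p) - 1):
--             rows.append((' ' * d + p[d] + '.', ''))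
--         rows.append((' ' * (len(p) - 1) + p[-1], v))
--         prev = p
--
--     keylen = max(len(k) for k, _ in rows)
--     return '\n'.join(k + ' ' * (keylen - len(k)) + ' ' + v for k, v in rows)
-- ===== Notes on version B (the rewrite author's own statement) =====
-- stated objective: alternative
-- what changed: B drops the nested dict and the recursive generator entirely: it keeps the dotted paths flat, filters out pairs overridden by a later prefix key, sorts the surviving paths lexicographically (which is exactly the sorted-DFS order), and emits header rows from the common prefix with the previous path.
import Mathlib
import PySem

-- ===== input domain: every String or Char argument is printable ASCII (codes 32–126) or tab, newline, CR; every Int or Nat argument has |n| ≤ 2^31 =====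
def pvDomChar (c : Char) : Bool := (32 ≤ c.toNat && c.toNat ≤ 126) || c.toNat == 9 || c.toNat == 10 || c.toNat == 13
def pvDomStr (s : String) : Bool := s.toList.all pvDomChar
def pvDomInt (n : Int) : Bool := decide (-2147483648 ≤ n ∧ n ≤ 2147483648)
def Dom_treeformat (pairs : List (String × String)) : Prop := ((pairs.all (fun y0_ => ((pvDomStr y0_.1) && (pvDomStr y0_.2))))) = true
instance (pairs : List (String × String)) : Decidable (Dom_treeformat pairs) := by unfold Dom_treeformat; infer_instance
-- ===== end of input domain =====

-- B replaces A's nested-dict build and recursive generator by a flat pipeline (filter the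
-- surviving dotted paths, sort them lexicographically, emit headers from common prefixes);
-- objective: alternative (same cost, no tree).

-- ===== PORT A =====
-- ' ' * n for n ≥ 0 (exact: Python repeats the single space n times)
def pvSpaces (n : Nat) : String := String.ofList (List.replicate n ' ')

-- a Python value in the nested dict: a leaf string, or a dict given as its
-- insertion-ordered association chain (nil / cons — an explicit chain, not a nested List)
inductive PNode where
  | leaf : String → PNode
  | nil : PNode
  | cons : String → PNode → PNode → PNode
deriving DecidableEq, Repr

-- tree.get(k) on the chain (first match = dict lookup; dict keys are unique)
def PNode.get? : PNode → String → Option PNode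
  | .cons k c r, x => if k = x then some c else r.get? x
  | _, _ => none

-- tree[x] = c : overwrite in place, else append (Python raises on a leaf; outside Pre_)
def PNode.set : PNode → String → PNode → PNode
  | .cons k c0 r, x, c => if k = x then .cons k c r else .cons k c0 (r.set x c)
  | .nil, x, c => .cons x c .nil
  | .leaf v, _, _ => .leaf v

-- mutate the value stored at key x in place (used for the recursive _insert(tree[x], …))
def PNode.modifyAt : PNode → String → (PNode → PNode) → PNode
  | .cons k c r, x, f => if k = x then .cons k (f c) r else .cons k c (r.modifyAt x f)
  | t, _, _ => t

def PNode.entries : PNode → List (String × PNode)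
  | .cons k c r => (k, c) :: r.entries
  | _ => []

def PNode.size : PNode → Nat
  | .leaf _ => 1
  | .nil => 1
  | .cons _ c r => 1 + c.size + r.size

-- termination measure for the traversal (cited by pvTraverse's decreasing_by)
theorem PNode.size_lt_of_mem_entries {t c : PNode} {k : String}
    (h : (k, c) ∈ t.entries) : c.size < t.size := by
  induction t with
  | leaf v => simp [PNode.entries] at h
  | nil => simp [PNode.entries] at h
  | cons k' c' r ihc ihr =>
    simp [PNode.entries] at h
    rcases h with ⟨h1, h2⟩ | h
    · subst h2; simp [PNode.size]; omega
    · have := ihr h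
      simp [PNode.size] at *; omega

-- _insert(tree, path, val)
def pvInsert (t : PNode) (path : List String) (val : String) : PNode :=
  match path with
  | [] => t                      -- unreachable: a '.'-split list is never empty
  | [p] => t.set p (.leaf val)
  | p :: rest =>
      let t' := if (t.get? p).isNone then t.set p .nil else t
      t'.modifyAt p (fun c => pvInsert c rest val)

-- 'isinstance(v, dict)' is 'v.leafVal? = none' (a PNode is a leaf string or a dict)
def PNode.leafVal? : PNode → Option String
  | .leaf v => some v
  | _ => none

-- _traverse(tree, depth) as the list of yielded (depth, key, val) rows;
-- 'for k in sorted(tree): v = tree[k]' is the sorted entry list (dict keys are unique)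
def pvTraverse (t : PNode) (depth : Nat) : List (Nat × String × String) :=
  (PySem.List.sorted t.entries (fun e => e.1) false).attach.flatMap
    (fun e =>
      match e.1.2.leafVal? with
      | some v => [(depth, e.1.1, v)]
      | none => (depth, e.1.1 ++ ".", "") :: pvTraverse e.1.2 (depth + 1))
termination_by t.size
decreasing_by
  have hm : (e.1.1, e.1.2) ∈ t.entries := by
    have := e.2
    rw [PySem.List.mem_sorted] at this
    simpa using this
  exact PNode.size_lt_of_mem_entries hm

def treeformat (pairs : List (String × String)) : String :=
  if pairs.length = 0 then "No stats yet"
  else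
    -- k.split('.') : the separator '.' is nonempty, so split? is always some
    let tree := pairs.foldl (fun t kv => pvInsert t ((PySem.Str.split? kv.1 ".").getD []) kv.2) .nil
    let rows := pvTraverse tree 0
    let keys := rows.map (fun r => pvSpaces r.1 ++ r.2.1)
    let vals := rows.map (fun r => r.2.2)
    -- max(map(len, keys)) : rows is nonempty whenever pairs is, so foldl max 0 is that max
    let keylen := (keys.map PySem.Str.len).foldl max 0
    let keys2 := keys.map (fun k => k ++ pvSpaces (max (keylen - PySem.Str.len k) 0).toNat)
    PySem.Str.join "\n" (List.zipWith (fun k v => k ++ " " ++ v) keys2 vals)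

-- ===== PORT B =====
def pvSplitPair (kv : String × String) : List String × String :=
  ((PySem.Str.split? kv.1 ".").getD [], kv.2)

-- the filter loop: keep (p, v) iff no later path is a (non-strict) prefix of p
def pvSurvivors : List (List String × String) → List (List String × String)
  | [] => []
  | (p, v) :: rest =>
      if rest.any (fun q => q.1.isPrefixOf p) then pvSurvivors rest
      else (p, v) :: pvSurvivors rest

-- the while loop: common prefix of prev and p, stopping before p's last component
def pvCpl : List String → List String → Nat
  | a :: prev, b :: c :: p => if a = b then pvCpl prev (c :: p) + 1 else 0
  | _, _ => 0

-- for d in range(c, len(p)-1): the header row at depth d (p[d] is total here: d < len(p)-1)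
def pvHeaders (p : List String) (c : Nat) : List (String × String) :=
  (List.range' c (p.length - 1 - c)).map (fun d => (pvSpaces d ++ p.getD d "" ++ ".", ""))

-- the main loop over the sorted leaves, carrying prev
def pvEmit : List (List String × String) → List String → List (String × String)
  | [], _ => []
  | (p, v) :: rest, prev =>
      pvHeaders p (pvCpl prev p)
        ++ (pvSpaces (p.length - 1) ++ p.getLastD "", v) :: pvEmit rest p

def treeformat_alt (pairs : List (String × String)) : String :=
  if pairs.length = 0 then "No stats yet"
  else
    let rows := pvEmit (PySem.List.sorted (pvSurvivors (pairs.map pvSplitPair)) (fun pv => pv.1) false) []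
    -- max(...) over the nonempty rows; ' '*(keylen-len) : toNat clamps at 0 exactly as str*negative
    let keylen := (rows.map (fun r => PySem.Str.len r.1)).foldl max 0
    PySem.Str.join "\n" (rows.map (fun r => r.1 ++ pvSpaces (keylen - PySem.Str.len r.1).toNat ++ " " ++ r.2))

-- ===== PRECONDITION & SPEC =====
-- Pre_ excludes exactly the inputs on which A raises TypeError: some earlier key's dotted
-- path is a proper prefix of a later key's path (then _insert indexes into a leaf string).
def Pre_treeformat (pairs : List (String × String)) : Prop :=
  pairs.Pairwise (fun x y =>
    ¬(((PySem.Str.split? x.1 ".").getD [] <+: (PySem.Str.split? y.1 ".").getD []) ∧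
      (PySem.Str.split? x.1 ".").getD [] ≠ (PySem.Str.split? y.1 ".").getD []))

instance (pairs : List (String × String)) : Decidable (Pre_treeformat pairs) := by
  unfold Pre_treeformat; infer_instance

def pvWitness_treeformat : (List (String × String)) :=
  [("boardlaw.elo", "3"), ("boardlaw.game", "17"), ("tick", "9"), ("boardlaw.elo", "4")]

def Spec_treeformat (pairs : List (String × String)) (out : String) : Prop := out = treeformat_alt pairs
instance (pairs : List (String × String)) (out : String) : Decidable (Spec_treeformat pairs out) := by
  unfold Spec_treeformat; infer_instance

-- ===== CLAIM (what is proved, stated in full; the proofs are below) =====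
def Claim_equal_treeformat : Prop := ∀ (pairs : List (String × String)), Dom_treeformat pairs → Pre_treeformat pairs → Spec_treeformat pairs (treeformat pairs)

-- ===== LEMMAS AND PROOFS =====


-- ---------- basic facts ----------

-- a '.'-split list is never empty
theorem pv_go_ne_nil (sep : List Char) (fuel : Nat) (l cur : List Char)
    (acc : List (List Char)) : PySem.Chars.splitOn.go sep fuel l cur acc ≠ [] := by
  induction fuel generalizing l cur acc with
  | zero => simp [PySem.Chars.splitOn.go]
  | succ fuel ih =>
    cases l with
    | nil => simp [PySem.Chars.splitOn.go]
    | cons c rest =>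
      rw [PySem.Chars.splitOn.go]
      split
      · exact ih _ _ _
      · exact ih _ _ _

theorem pvPath_ne_nil (s : String) : (PySem.Str.split? s ".").getD [] ≠ [] := by
  simp only [PySem.Str.split?, PySem.Chars.split?]
  have hsep : (".".toList.isEmpty) = false := by decide
  rw [hsep]
  simp [PySem.Chars.splitOn]
  exact fun h => pv_go_ne_nil _ _ _ _ _ (by simpa using congrArg (List.map String.ofList) h)

-- ---------- well-formedness of the built tree ----------

def pvKeys : PNode → List String
  | .cons k _ r => k :: pvKeys r
  | _ => []

-- chain of a dict: unique keys, children non-empty dicts or leaves, rest a chain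
def pvWf : PNode → Bool
  | .leaf _ => true
  | .nil => true
  | .cons k c r =>
      decide (k ∉ pvKeys r) && decide (c ≠ .nil) && decide (r.leafVal? = none) && pvWf c && pvWf r

-- ---------- leaves of a tree ----------

-- leaves in chain (insertion) order
def pvLeaves : PNode → List (List String × String)
  | .leaf _ => []
  | .nil => []
  | .cons k c r =>
      (match c.leafVal? with
       | some v => [([k], v)]
       | none => (pvLeaves c).map (fun pv => (k :: pv.1, pv.2))) ++ pvLeaves r

-- leaves in sorted-DFS order (the order _traverse walks them)
def pvLeavesS (t : PNode) : List (List String × String) :=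
  (PySem.List.sorted t.entries (fun e => e.1) false).attach.flatMap
    (fun e =>
      match e.1.2.leafVal? with
      | some v => [([e.1.1], v)]
      | none => (pvLeavesS e.1.2).map (fun pv => (e.1.1 :: pv.1, pv.2)))
termination_by t.size
decreasing_by
  have hm : (e.1.1, e.1.2) ∈ t.entries := by
    have := e.2
    rw [PySem.List.mem_sorted] at this
    simpa using this
  exact PNode.size_lt_of_mem_entries hm

-- the per-entry chunks, as plain functions
def pvChunkL (e : String × PNode) : List (List String × String) :=
  match e.2.leafVal? with
  | some v => [([e.1], v)]
  | none => (pvLeavesS e.2).map (fun pv => (e.1 :: pv.1, pv.2))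

def pvChunkT (d : Nat) (e : String × PNode) : List (Nat × String × String) :=
  match e.2.leafVal? with
  | some v => [(d, e.1, v)]
  | none => (d, e.1 ++ ".", "") :: pvTraverse e.2 (d + 1)

theorem pv_flatMap_attach {α β : Type} (xs : List α) (F : α → List β) :
    xs.attach.flatMap (fun e => F e.1) = xs.flatMap F := by
  induction xs with
  | nil => rfl
  | cons x xs ih =>
    rw [List.attach_cons, List.flatMap_cons, List.flatMap_cons, List.flatMap_map, ← ih]

theorem pvLeavesS_eq (t : PNode) :
    pvLeavesS t = (PySem.List.sorted t.entries (fun e => e.1) false).flatMap pvChunkL := by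
  rw [pvLeavesS]
  exact pv_flatMap_attach _ pvChunkL

theorem pvTraverse_eq (t : PNode) (d : Nat) :
    pvTraverse t d = (PySem.List.sorted t.entries (fun e => e.1) false).flatMap (pvChunkT d) := by
  rw [pvTraverse]
  exact pv_flatMap_attach _ (pvChunkT d)

-- ---------- pvLeavesS is a permutation of pvLeaves ----------

theorem pv_chain_flatMap_perm (t : PNode)
    (hIH : ∀ k c, (k, c) ∈ t.entries → (pvLeavesS c).Perm (pvLeaves c)) :
    (t.entries.flatMap pvChunkL).Perm (pvLeaves t) := by
  induction t with
  | leaf v => simp [PNode.entries, pvLeaves]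
  | nil => simp [PNode.entries, pvLeaves]
  | cons k c r ihc ihr =>
    rw [PNode.entries, List.flatMap_cons, pvLeaves]
    refine List.Perm.append ?_ (ihr (fun k' c' h => hIH k' c' (by simp [PNode.entries, h])))
    rw [pvChunkL]
    cases h : c.leafVal? with
    | some v => exact List.Perm.refl _
    | none => exact (hIH k c (by simp [PNode.entries])).map _

theorem pvLeavesS_perm_aux : ∀ n t, PNode.size t ≤ n → (pvLeavesS t).Perm (pvLeaves t) := by
  intro n
  induction n with
  | zero => intro t ht; cases t <;> simp [PNode.size] at ht
  | succ n ih =>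
    intro t ht
    rw [pvLeavesS_eq]
    refine List.Perm.trans ?_ (pv_chain_flatMap_perm t ?_)
    · exact List.Perm.flatMap (PySem.List.sorted_perm _ _ _) (fun a _ => List.Perm.refl _)
    · intro k c hm
      refine ih c ?_
      have := PNode.size_lt_of_mem_entries hm
      omega

theorem pvLeavesS_perm (t : PNode) : (pvLeavesS t).Perm (pvLeaves t) :=
  pvLeavesS_perm_aux t.size t le_rfl

-- ---------- shape facts about leaves ----------

theorem pvLeaves_shape (t : PNode) :
    ∀ pv ∈ pvLeaves t, ∃ k rest, pv.1 = k :: rest ∧ k ∈ pvKeys t := by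
  induction t with
  | leaf v => simp [pvLeaves]
  | nil => simp [pvLeaves]
  | cons k c r ihc ihr =>
    intro pv hpv
    rw [pvLeaves, List.mem_append] at hpv
    rcases hpv with hpv | hpv
    · cases h : c.leafVal? with
      | some v => rw [h] at hpv; simp at hpv; exact ⟨k, [], by simp [hpv, pvKeys]⟩
      | none =>
        rw [h] at hpv; simp at hpv
        obtain ⟨a, b, _, h2⟩ := hpv
        exact ⟨k, a, by simp [← h2, pvKeys]⟩
    · obtain ⟨k', rest, h1, h2⟩ := ihr pv hpv
      exact ⟨k', rest, h1, by simp [pvKeys, h2]⟩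

theorem pvLeaves_ne_nil_path (t : PNode) : ∀ pv ∈ pvLeaves t, pv.1 ≠ [] := by
  intro pv hpv
  obtain ⟨k, rest, h1, _⟩ := pvLeaves_shape t pv hpv
  simp [h1]

-- ---------- the common-prefix computation ----------

theorem pvCpl_self (ctx : List String) (k : String) (s : List String) :
    pvCpl ctx (ctx ++ k :: s) = ctx.length := by
  induction ctx with
  | nil => cases s <;> rfl
  | cons a ctx ih =>
    cases hc : ctx ++ k :: s with
    | nil => exact absurd hc (by simp)
    | cons b p =>
      cases p with
      | nil =>
        cases ctx with
        | nil => simp at hc; simp [pvCpl, hc, ← ih]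
        | cons a' ctx' => simp at hc
      | cons c p' => rw [List.cons_append, hc, pvCpl, if_pos rfl, ← hc, ih]; rfl

theorem pvCpl_diff (ctx : List String) (k' k : String) (tl s : List String) (h : k' ≠ k) :
    pvCpl (ctx ++ k' :: tl) (ctx ++ k :: s) = ctx.length := by
  induction ctx with
  | nil =>
    cases s with
    | nil => rfl
    | cons c s' => simp [pvCpl, h]
  | cons a ctx ih =>
    cases hc : ctx ++ k :: s with
    | nil => exact absurd hc (by simp)
    | cons b p =>
      cases p with
      | nil =>
        cases ctx with
        | nil =>
          simp at hc
          simp [pvCpl, hc.1, hc.2, ← ih]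
        | cons a' ctx' => simp at hc
      | cons c p' => rw [List.cons_append, List.cons_append, hc, pvCpl, if_pos rfl, ← hc, ih]; rfl

-- ---------- well-formedness: children ----------

theorem pvWf_child {t : PNode} (hwf : pvWf t = true) :
    ∀ k c, (k, c) ∈ t.entries → pvWf c = true ∧ c ≠ .nil := by
  induction t with
  | leaf v => simp [PNode.entries]
  | nil => simp [PNode.entries]
  | cons k' c' r ihc ihr =>
    rw [pvWf] at hwf
    simp only [Bool.and_eq_true, decide_eq_true_eq] at hwf
    obtain ⟨⟨⟨⟨hk, hcn⟩, hrl⟩, hwc⟩, hwr⟩ := hwf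
    intro k c hm
    rw [PNode.entries] at hm
    simp at hm
    rcases hm with ⟨h1, h2⟩ | hm
    · subst h2; exact ⟨hwc, hcn⟩
    · exact ihr hwr k c hm

theorem pvWf_keys_nodup {t : PNode} (hwf : pvWf t = true) : (pvKeys t).Nodup := by
  induction t with
  | leaf v => simp [pvKeys]
  | nil => simp [pvKeys]
  | cons k c r ihc ihr =>
    rw [pvWf] at hwf
    simp only [Bool.and_eq_true, decide_eq_true_eq] at hwf
    obtain ⟨⟨⟨⟨hk, hcn⟩, hrl⟩, hwc⟩, hwr⟩ := hwf
    rw [pvKeys]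
    exact List.Nodup.cons hk (ihr hwr)

theorem pvKeys_eq_map_entries (t : PNode) : pvKeys t = t.entries.map (fun e => e.1) := by
  induction t with
  | leaf v => rfl
  | nil => rfl
  | cons k c r ihc ihr => simp [pvKeys, PNode.entries, ihr]

-- ---------- chunk shape and non-emptiness ----------

theorem pvChunkL_shape (e : String × PNode) :
    ∀ pv ∈ pvChunkL e, ∃ rest, pv.1 = e.1 :: rest := by
  intro pv hpv
  rw [pvChunkL] at hpv
  cases h : e.2.leafVal? with
  | some v => rw [h] at hpv; simp at hpv; exact ⟨[], by simp [hpv]⟩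
  | none =>
    rw [h] at hpv; simp at hpv
    obtain ⟨a, b, _, h2⟩ := hpv
    exact ⟨a, by simp [← h2]⟩

theorem pvLeaves_ne_nil {t : PNode} (hwf : pvWf t = true)
    (ht : ∃ k c r, t = .cons k c r) : pvLeaves t ≠ [] := by
  induction t with
  | leaf v => simp at ht
  | nil => simp at ht
  | cons k c r ihc ihr =>
    rw [pvWf] at hwf
    simp only [Bool.and_eq_true, decide_eq_true_eq] at hwf
    obtain ⟨⟨⟨⟨hk, hcn⟩, hrl⟩, hwc⟩, hwr⟩ := hwf
    rw [pvLeaves]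
    cases hcl : c.leafVal? with
    | some v => simp
    | none =>
      cases c with
      | leaf v => simp [PNode.leafVal?] at hcl
      | nil => exact absurd rfl hcn
      | cons k' c' r' =>
        have := ihc hwc ⟨k', c', r', rfl⟩
        simp [this]

theorem pvLeavesS_ne_nil {t : PNode} (hwf : pvWf t = true)
    (ht : ∃ k c r, t = .cons k c r) : pvLeavesS t ≠ [] := by
  intro h
  have hp := pvLeavesS_perm t
  rw [h] at hp
  exact pvLeaves_ne_nil hwf ht hp.nil_eq.symm

-- ---------- strict lexicographic order of pvLeavesS ----------

theorem pv_cons_lt_cons {k : String} {p q : List String} (h : p < q) : k :: p < k :: q := by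
  show List.Lex (· < ·) (k :: p) (k :: q)
  exact List.Lex.cons h

theorem pv_lt_of_head_lt {k1 k2 : String} {p q : List String} (h : k1 < k2) :
    k1 :: p < k2 :: q := by
  show List.Lex (· < ·) (k1 :: p) (k2 :: q)
  exact List.Lex.rel h

theorem pvLeavesS_pairwise : ∀ n t, PNode.size t ≤ n → pvWf t = true →
    List.Pairwise (fun a b => a.1 < b.1) (pvLeavesS t) := by
  intro n
  induction n with
  | zero => intro t ht; cases t <;> simp [PNode.size] at ht
  | succ n ih =>
    intro t ht hwf
    rw [pvLeavesS_eq, List.pairwise_flatMap]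
    constructor
    · intro e he
      rw [PySem.List.mem_sorted] at he
      obtain ⟨hwc, hcn⟩ := pvWf_child hwf e.1 e.2 (by simpa using he)
      rw [pvChunkL]
      cases hcl : e.2.leafVal? with
      | some v => simp
      | none =>
        refine List.Pairwise.map _ ?_ (ih e.2 ?_ hwc)
        · intro a b hab; exact pv_cons_lt_cons hab
        · have := PNode.size_lt_of_mem_entries (t := t) (by simpa using he)
          omega
    · have hle : List.Pairwise (fun a b => a.1 ≤ b.1)
          (PySem.List.sorted t.entries (fun e => e.1) false) :=
        PySem.List.sorted_pairwise _ _
      have hnd : ((PySem.List.sorted t.entries (fun e => e.1) false).map (fun e => e.1)).Nodup := by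
        refine (List.Perm.nodup_iff (List.Perm.map _ (PySem.List.sorted_perm _ _ _))).mpr ?_
        rw [← pvKeys_eq_map_entries]; exact pvWf_keys_nodup hwf
      have hnd' : List.Pairwise (fun a b => a.1 ≠ b.1)
          (PySem.List.sorted t.entries (fun e => e.1) false) := by
        rw [← List.pairwise_map]; exact hnd
      refine List.Pairwise.imp ?_ (hle.and hnd')
      rintro e1 e2 ⟨h1, h2⟩ a ha b hb
      obtain ⟨ra, hra⟩ := pvChunkL_shape e1 a ha
      obtain ⟨rb, hrb⟩ := pvChunkL_shape e2 b hb
      rw [hra, hrb]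
      exact pv_lt_of_head_lt (lt_of_le_of_ne h1 h2)

-- ---------- emit machinery ----------

def pvAbs (ctx : List String) (pv : List String × String) : List String × String :=
  (ctx ++ pv.1, pv.2)

def pvRow (r : Nat × String × String) : String × String :=
  (pvSpaces r.1 ++ r.2.1, r.2.2)

def pvLastCtx : List (List String × String) → List String → List String
  | [], prev => prev
  | (p, _) :: rest, _ => pvLastCtx rest p

theorem pvLastCtx_mem (xs : List (List String × String)) (prev : List String) (h : xs ≠ []) :
    pvLastCtx xs prev ∈ xs.map (fun pv => pv.1) := by
  induction xs generalizing prev with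
  | nil => exact absurd rfl h
  | cons x xs ih =>
    obtain ⟨p, v⟩ := x
    cases xs with
    | nil => simp [pvLastCtx]
    | cons y ys => simpa [pvLastCtx] using Or.inr (ih p (by simp))

theorem pvEmit_append (xs ys : List (List String × String)) (prev : List String) :
    pvEmit (xs ++ ys) prev = pvEmit xs prev ++ pvEmit ys (pvLastCtx xs prev) := by
  induction xs generalizing prev with
  | nil => rfl
  | cons x xs ih =>
    obtain ⟨p, v⟩ := x
    rw [List.cons_append, pvEmit, pvEmit, pvLastCtx, ih]
    simp

theorem pvHeaders_step (p : List String) (c : Nat) (h : c < p.length - 1) :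
    pvHeaders p c = (pvSpaces c ++ p.getD c "" ++ ".", "") :: pvHeaders p (c + 1) := by
  rw [pvHeaders, pvHeaders]
  have h1 : p.length - 1 - c = (p.length - 1 - (c + 1)) + 1 := by omega
  rw [h1, List.range'_succ, List.map_cons]

theorem pvGetD_ctx (ctx : List String) (k : String) (s : List String) (d : String) :
    (ctx ++ k :: s).getD ctx.length d = k := by
  rw [List.getD_eq_getElem?_getD, List.getElem?_append_right le_rfl]
  simp

theorem pvSize_pos (t : PNode) : 1 ≤ t.size := by
  cases t with
  | leaf v => simp [PNode.size]
  | nil => simp [PNode.size]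
  | cons k c r => rw [PNode.size]; omega

theorem pvLeavesS_paths_ne_nil (t : PNode) : ∀ pv ∈ pvLeavesS t, pv.1 ≠ [] := by
  intro pv hpv
  exact pvLeaves_ne_nil_path t pv (((pvLeavesS_perm t).mem_iff).mp hpv)

-- emitting a chunk that lives strictly below ctx ++ [k]: the first header is k's,
-- the rest is the same emission restarted with prev = ctx ++ [k]
theorem pvEmit_shift (L : List (List String × String)) (ctx : List String) (k : String)
    (prev : List String) (hL : L ≠ [])
    (hshape : ∀ pv ∈ L, ∃ rel, rel ≠ [] ∧ pv.1 = (ctx ++ [k]) ++ rel)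
    (hp : prev = ctx ∨ ∃ k' tl, prev = ctx ++ k' :: tl ∧ k' ≠ k) :
    pvEmit L prev = (pvSpaces ctx.length ++ k ++ ".", "") :: pvEmit L (ctx ++ [k]) := by
  cases L with
  | nil => exact absurd rfl hL
  | cons x rest =>
    obtain ⟨p, v⟩ := x
    obtain ⟨rel, hrel, hped⟩ := hshape (p, v) (by simp)
    cases rel with
    | nil => exact absurd rfl hrel
    | cons r0 rel' =>
      simp only at hped
      have hps : p = ctx ++ k :: (r0 :: rel') := by rw [hped]; simp
      have hcpl1 : pvCpl prev p = ctx.length := by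
        rcases hp with rfl | ⟨k', tl, rfl, hk'⟩
        · rw [hps]; exact pvCpl_self _ _ _
        · rw [hps]; exact pvCpl_diff _ _ _ _ _ hk'
      have hcpl2 : pvCpl (ctx ++ [k]) p = ctx.length + 1 := by
        have h2 : pvCpl (ctx ++ [k]) ((ctx ++ [k]) ++ r0 :: rel') = (ctx ++ [k]).length :=
          pvCpl_self _ _ _
        rw [hped, h2]
        simp
      have hlen : ctx.length < p.length - 1 := by
        rw [hps]; simp
      rw [pvEmit, pvEmit, hcpl1, hcpl2, pvHeaders_step p ctx.length hlen]
      rw [hps, pvGetD_ctx]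
      simp

-- ---------- the central lemma: emission over sorted leaves = sorted-DFS traversal ----------

theorem pvInnerAux (n : Nat)
    (IH : ∀ t, PNode.size t ≤ n → pvWf t = true → ∀ ctx : List String,
      pvEmit ((pvLeavesS t).map (pvAbs ctx)) ctx = (pvTraverse t ctx.length).map pvRow) :
    ∀ es : List (String × PNode),
      (∀ e ∈ es, PNode.size e.2 ≤ n ∧ pvWf e.2 = true ∧ e.2 ≠ .nil) →
      ((es.map (fun e => e.1)).Nodup) →
      ∀ ctx prev : List String,
        (prev = ctx ∨ ∃ k' tl, prev = ctx ++ k' :: tl ∧ k' ∉ es.map (fun e => e.1)) →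
        pvEmit ((es.flatMap pvChunkL).map (pvAbs ctx)) prev
          = (es.flatMap (pvChunkT ctx.length)).map pvRow := by
  intro es
  induction es with
  | nil => intro _ _ ctx prev _; rfl
  | cons e es ih =>
    intro hcond hnd ctx prev hp
    obtain ⟨hsz, hwfe, hnnil⟩ := hcond e (by simp)
    rw [List.flatMap_cons, List.flatMap_cons, List.map_append, List.map_append,
      pvEmit_append]
    have hnd' : (es.map (fun e => e.1)).Nodup := by simpa using hnd.of_cons
    have hknotin : e.1 ∉ es.map (fun e => e.1) := by
      rw [List.map_cons, List.nodup_cons] at hnd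
      exact hnd.1
    cases hcl : e.2.leafVal? with
    | some v =>
      -- leaf chunk: a single row at depth ctx.length
      have hchunk : pvChunkL e = [([e.1], v)] := by rw [pvChunkL, hcl]
      have hchunkT : pvChunkT ctx.length e = [(ctx.length, e.1, v)] := by
        rw [pvChunkT, hcl]
      have hcpl : pvCpl prev (ctx ++ [e.1]) = ctx.length := by
        rcases hp with rfl | ⟨k', tl, rfl, hk'⟩
        · exact pvCpl_self _ _ _
        · refine pvCpl_diff _ _ _ _ _ ?_
          intro hkk; exact hk' (by simp [hkk])
      have hlast : pvLastCtx ([([e.1], v)].map (pvAbs ctx)) prev = ctx ++ [e.1] := by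
        rfl
      rw [hchunk, hchunkT, hlast]
      have hemit1 : pvEmit ([([e.1], v)].map (pvAbs ctx)) prev
          = [(pvSpaces ctx.length ++ e.1, v)] := by
        show pvEmit [(ctx ++ [e.1], v)] prev = _
        rw [pvEmit, hcpl, pvHeaders]
        have hl : (ctx ++ [e.1]).length - 1 = ctx.length := by simp
        rw [hl]
        simp [pvEmit]
      rw [hemit1, ih (fun e' he' => hcond e' (by simp [he'])) hnd' ctx (ctx ++ [e.1])
        (Or.inr ⟨e.1, [], by simp, hknotin⟩)]
      simp [pvRow]
    | none =>
      -- dict chunk: one header row, then the whole subtree one level deeper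
      have hwfc := hwfe
      have hchunk : pvChunkL e = (pvLeavesS e.2).map (fun pv => (e.1 :: pv.1, pv.2)) := by
        rw [pvChunkL, hcl]
      have hchunkT : pvChunkT ctx.length e
          = (ctx.length, e.1 ++ ".", "") :: pvTraverse e.2 (ctx.length + 1) := by
        rw [pvChunkT, hcl]
      have hcons : ∃ k' c' r', e.2 = .cons k' c' r' := by
        cases he2 : e.2 with
        | leaf v => rw [he2] at hcl; simp [PNode.leafVal?] at hcl
        | nil => exact absurd he2 hnnil
        | cons k' c' r' => exact ⟨k', c', r', rfl⟩
      have hLne : pvLeavesS e.2 ≠ [] := pvLeavesS_ne_nil hwfc hcons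
      -- the absolute chunk is the e.2 chunk re-based at ctx ++ [e.1]
      have habs : (pvChunkL e).map (pvAbs ctx)
          = (pvLeavesS e.2).map (pvAbs (ctx ++ [e.1])) := by
        rw [hchunk, List.map_map]
        refine List.map_congr_left ?_
        intro pv _
        simp [pvAbs]
      have hLne' : (pvLeavesS e.2).map (pvAbs (ctx ++ [e.1])) ≠ [] := by
        simpa using hLne
      have hshape : ∀ pv ∈ (pvLeavesS e.2).map (pvAbs (ctx ++ [e.1])),
          ∃ rel, rel ≠ [] ∧ pv.1 = (ctx ++ [e.1]) ++ rel := by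
        intro pv hpv
        simp only [List.mem_map] at hpv
        obtain ⟨pv0, hpv0, rfl⟩ := hpv
        exact ⟨pv0.1, pvLeavesS_paths_ne_nil e.2 pv0 hpv0, rfl⟩
      have hp' : prev = ctx ∨ ∃ k' tl, prev = ctx ++ k' :: tl ∧ k' ≠ e.1 := by
        rcases hp with rfl | ⟨k', tl, h1, h2⟩
        · exact Or.inl rfl
        · exact Or.inr ⟨k', tl, h1, fun hkk => h2 (by simp [hkk])⟩
      rw [habs, pvEmit_shift _ ctx e.1 prev hLne' hshape hp']
      have hIH := IH e.2 hsz hwfc (ctx ++ [e.1])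
      have hlen : (ctx ++ [e.1]).length = ctx.length + 1 := by simp
      rw [hlen] at hIH
      rw [hIH]
      -- the continuation: prev is now the last leaf of this chunk, which starts with e.1
      have hlastmem : pvLastCtx ((pvLeavesS e.2).map (pvAbs (ctx ++ [e.1]))) prev
          ∈ ((pvLeavesS e.2).map (pvAbs (ctx ++ [e.1]))).map (fun pv => pv.1) :=
        pvLastCtx_mem _ _ hLne'
      have hlast : ∃ tl, pvLastCtx ((pvLeavesS e.2).map (pvAbs (ctx ++ [e.1]))) prev
          = ctx ++ e.1 :: tl := by
        simp only [List.map_map, List.mem_map] at hlastmem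
        obtain ⟨pv0, _, h0⟩ := hlastmem
        exact ⟨pv0.1, by rw [← h0]; simp [pvAbs]⟩
      obtain ⟨tl, htl⟩ := hlast
      rw [htl, ih (fun e' he' => hcond e' (by simp [he'])) hnd' ctx (ctx ++ e.1 :: tl)
        (Or.inr ⟨e.1, tl, rfl, hknotin⟩)]
      rw [hchunkT]
      simp [pvRow, String.append_assoc]

theorem pvMain : ∀ n t, PNode.size t ≤ n → pvWf t = true → ∀ ctx : List String,
    pvEmit ((pvLeavesS t).map (pvAbs ctx)) ctx = (pvTraverse t ctx.length).map pvRow := by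
  intro n
  induction n with
  | zero => intro t ht; have := pvSize_pos t; omega
  | succ n ih =>
    intro t ht hwf ctx
    rw [pvLeavesS_eq, pvTraverse_eq]
    refine pvInnerAux n ih _ ?_ ?_ ctx ctx (Or.inl rfl)
    · intro e he
      rw [PySem.List.mem_sorted] at he
      have hsz := PNode.size_lt_of_mem_entries (t := t) (k := e.1) (c := e.2) (by simpa using he)
      obtain ⟨hwc, hnn⟩ := pvWf_child hwf e.1 e.2 (by simpa using he)
      exact ⟨by omega, hwc, hnn⟩
    · refine (List.Perm.nodup_iff (List.Perm.map _ (PySem.List.sorted_perm _ _ _))).mpr ?_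
      rw [← pvKeys_eq_map_entries]; exact pvWf_keys_nodup hwf

-- ---------- chain lemmas for set / modifyAt / get? ----------

theorem pvGet?_eq_none_iff (t : PNode) (x : String) : t.get? x = none ↔ x ∉ pvKeys t := by
  induction t with
  | leaf v => simp [PNode.get?, pvKeys]
  | nil => simp [PNode.get?, pvKeys]
  | cons k c r ihc ihr =>
    rw [PNode.get?, pvKeys]
    by_cases h : k = x
    · simp [h]
    · simp [h, ihr, Ne.symm h]

theorem pvGet?_some_mem {t : PNode} {x : String} {c : PNode} (h : t.get? x = some c) :
    (x, c) ∈ t.entries := by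
  induction t with
  | leaf v => simp [PNode.get?] at h
  | nil => simp [PNode.get?] at h
  | cons k c' r ihc ihr =>
    rw [PNode.get?] at h
    by_cases hk : k = x
    · rw [if_pos hk] at h
      injection h with h'
      subst hk; subst h'
      rw [PNode.entries]
      simp
    · rw [if_neg hk] at h
      rw [PNode.entries]
      simp
      exact Or.inr (ihr h)

theorem pvSet_leafVal? {t : PNode} (h : t.leafVal? = none) (x : String) (c : PNode) :
    (t.set x c).leafVal? = none := by
  cases t with
  | leaf v => simp [PNode.leafVal?] at h
  | nil => rfl
  | cons k c' r => rw [PNode.set]; split <;> rfl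

theorem pvSet_ne_nil {t : PNode} (h : t.leafVal? = none) (x : String) (c : PNode) :
    t.set x c ≠ .nil := by
  cases t with
  | leaf v => simp [PNode.leafVal?] at h
  | nil => simp [PNode.set]
  | cons k c' r => rw [PNode.set]; split <;> simp

theorem pvModifyAt_leafVal? {t : PNode} (h : t.leafVal? = none) (x : String) (f : PNode → PNode) :
    (t.modifyAt x f).leafVal? = none := by
  cases t with
  | leaf v => simp [PNode.leafVal?] at h
  | nil => rfl
  | cons k c' r => rw [PNode.modifyAt]; split <;> rfl

theorem pvModifyAt_ne_nil {t : PNode} (h : t.leafVal? = none) (x : String) (f : PNode → PNode) :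
    t.modifyAt x f ≠ .nil ∨ t = .nil := by
  cases t with
  | leaf v => simp [PNode.leafVal?] at h
  | nil => exact Or.inr rfl
  | cons k c' r => rw [PNode.modifyAt]; left; split <;> simp

theorem pvSet_keys {t : PNode} (hwf : pvWf t = true) (h : t.leafVal? = none)
    (x : String) (c : PNode) :
    pvKeys (t.set x c) = if x ∈ pvKeys t then pvKeys t else pvKeys t ++ [x] := by
  induction t with
  | leaf v => simp [PNode.leafVal?] at h
  | nil => simp [PNode.set, pvKeys]
  | cons k c' r ihc ihr =>
    rw [pvWf] at hwf
    simp only [Bool.and_eq_true, decide_eq_true_eq] at hwf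
    obtain ⟨⟨⟨⟨hknm, hcn⟩, hrl⟩, hwc⟩, hwr⟩ := hwf
    rw [PNode.set]
    by_cases hk : k = x
    · simp [hk, pvKeys]
    · rw [if_neg hk, pvKeys, pvKeys, ihr hwr hrl]
      by_cases hx : x ∈ pvKeys r
      · simp [hx, Ne.symm hk]
      · simp [hx, Ne.symm hk]

theorem pvModifyAt_keys (t : PNode) (x : String) (f : PNode → PNode) :
    pvKeys (t.modifyAt x f) = pvKeys t := by
  induction t with
  | leaf v => rfl
  | nil => rfl
  | cons k c r ihc ihr =>
    rw [PNode.modifyAt]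
    split <;> simp [pvKeys, ihr]

theorem pvSet_wf {t : PNode} (hwf : pvWf t = true) (h : t.leafVal? = none)
    (x : String) {c : PNode} (hc : pvWf c = true) (hcn : c ≠ .nil) :
    pvWf (t.set x c) = true := by
  induction t with
  | leaf v => simp [PNode.leafVal?] at h
  | nil => simp [PNode.set, pvWf, pvKeys, PNode.leafVal?, hc, hcn]
  | cons k c' r ihc ihr =>
    rw [pvWf] at hwf
    simp only [Bool.and_eq_true, decide_eq_true_eq] at hwf
    obtain ⟨⟨⟨⟨hk, hcn'⟩, hrl⟩, hwc⟩, hwr⟩ := hwf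
    rw [PNode.set]
    by_cases hkx : k = x
    · rw [if_pos hkx, pvWf]
      simp [hk, hcn, hrl, hc, hwr]
    · rw [if_neg hkx, pvWf]
      simp only [Bool.and_eq_true, decide_eq_true_eq]
      refine ⟨⟨⟨⟨?_, hcn'⟩, pvSet_leafVal? hrl x c⟩, hwc⟩, ihr hwr hrl⟩
      rw [pvSet_keys hwr hrl]
      split
      · exact hk
      · simp [hk, hkx]

theorem pvModifyAt_wf {t : PNode} (hwf : pvWf t = true) (x : String) {f : PNode → PNode}
    (hf : ∀ c, pvWf c = true → c ≠ .nil → pvWf (f c) = true ∧ f c ≠ .nil) :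
    pvWf (t.modifyAt x f) = true := by
  induction t with
  | leaf v => exact hwf
  | nil => exact hwf
  | cons k c r ihc ihr =>
    rw [pvWf] at hwf
    simp only [Bool.and_eq_true, decide_eq_true_eq] at hwf
    obtain ⟨⟨⟨⟨hk, hcn⟩, hrl⟩, hwc⟩, hwr⟩ := hwf
    rw [PNode.modifyAt]
    by_cases hkx : k = x
    · rw [if_pos hkx, pvWf]
      obtain ⟨h1, h2⟩ := hf c hwc hcn
      simp [hk, hrl, h1, h2, hwr]
    · rw [if_neg hkx, pvWf]
      simp only [Bool.and_eq_true, decide_eq_true_eq]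
      exact ⟨⟨⟨⟨by rw [pvModifyAt_keys]; exact hk, hcn⟩,
        pvModifyAt_leafVal? hrl x f⟩, hwc⟩, ihr hwr⟩

theorem pvSet_modify_new {t : PNode} {x : String} (hx : t.get? x = none) (f : PNode → PNode) :
    (t.set x .nil).modifyAt x f = t.set x (f .nil) := by
  induction t with
  | leaf v => rfl
  | nil => simp [PNode.set, PNode.modifyAt]
  | cons k c r ihc ihr =>
    rw [PNode.get?] at hx
    by_cases hk : k = x
    · rw [if_pos hk] at hx; exact absurd hx (by simp)
    · rw [if_neg hk] at hx
      rw [PNode.set, if_neg hk, PNode.modifyAt, if_neg hk, PNode.set, if_neg hk, ihr hx]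

theorem pvInsert_leaf_id (path : List String) (w v : String) :
    pvInsert (.leaf w) path v = .leaf w := by
  match path with
  | [] => rfl
  | [p] => rfl
  | p :: q :: rest => rfl

theorem pvInsert_wf : ∀ (path : List String) (t : PNode) (v : String), path ≠ [] →
    pvWf t = true → t.leafVal? = none →
    pvWf (pvInsert t path v) = true ∧ (pvInsert t path v).leafVal? = none ∧
      pvInsert t path v ≠ .nil := by
  intro path
  induction path with
  | nil => intro t v h; exact absurd rfl h
  | cons p rest ih =>
    intro t v _ hwf hl
    cases rest with
    | nil =>
      show pvWf (t.set p (.leaf v)) = true ∧ _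
      exact ⟨pvSet_wf hwf hl p (by rfl) (by simp), pvSet_leafVal? hl p _, pvSet_ne_nil hl p _⟩
    | cons q rest' =>
      have hun : pvInsert t (p :: q :: rest') v
          = (if (t.get? p).isNone then t.set p .nil else t).modifyAt p
              (fun c => pvInsert c (q :: rest') v) := rfl
      have hof : ∀ c, pvWf c = true → c ≠ .nil →
          pvWf (pvInsert c (q :: rest') v) = true ∧ pvInsert c (q :: rest') v ≠ .nil := by
        intro c hc hcn
        cases hcl : c.leafVal? with
        | some w =>
          cases c with
          | leaf w' => rw [pvInsert_leaf_id]; exact ⟨hc, by simp⟩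
          | nil => simp [PNode.leafVal?] at hcl
          | cons _ _ _ => simp [PNode.leafVal?] at hcl
        | none =>
          obtain ⟨h1, _, h3⟩ := ih c v (by simp) hc hcl
          exact ⟨h1, h3⟩
      cases hg : t.get? p with
      | none =>
        rw [hun, hg]
        simp only [Option.isNone_none, if_pos]
        rw [pvSet_modify_new hg]
        obtain ⟨h1, _, h3⟩ := ih .nil v (by simp) (by rfl) (by rfl)
        exact ⟨pvSet_wf hwf hl p h1 h3, pvSet_leafVal? hl p _, pvSet_ne_nil hl p _⟩
      | some c0 =>
        rw [hun, hg]
        simp only [Option.isNone_some, Bool.false_eq_true, ite_false]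
        refine ⟨pvModifyAt_wf hwf p hof, pvModifyAt_leafVal? hl p _, ?_⟩
        rcases pvModifyAt_ne_nil hl p (fun c => pvInsert c (q :: rest') v) with h | h
        · exact h
        · rw [h] at hg
          simp [PNode.get?] at hg

-- ---------- leaves after one insertion ----------

def pvChunkC (k : String) (c : PNode) : List (List String × String) :=
  match c.leafVal? with
  | some v => [([k], v)]
  | none => (pvLeaves c).map (fun pv => (k :: pv.1, pv.2))

theorem pvLeaves_cons_eq (k : String) (c r : PNode) :
    pvLeaves (.cons k c r) = pvChunkC k c ++ pvLeaves r := rfl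

theorem pvChunk_head (k : String) (c : PNode) :
    ∀ pv ∈ pvChunkC k c, ∃ rest, pv.1 = k :: rest := by
  intro pv hpv
  rw [pvChunkC] at hpv
  cases hcl : c.leafVal? with
  | some v => rw [hcl] at hpv; simp at hpv; exact ⟨[], by simp [hpv]⟩
  | none =>
    rw [hcl] at hpv; simp at hpv
    obtain ⟨a, b, _, h2⟩ := hpv
    exact ⟨a, by simp [← h2]⟩

theorem pvChunk_keep {k x : String} (hne : k ≠ x) (c : PNode) (q : List String) :
    (pvChunkC k c).filter (fun pv => !decide ((x :: q) <+: pv.1)) = pvChunkC k c := by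
  refine List.filter_eq_self.mpr ?_
  intro pv hpv
  obtain ⟨rest, hrest⟩ := pvChunk_head k c pv hpv
  simp [hrest, List.cons_prefix_cons, Ne.symm hne]

theorem pvRest_not_prefix {r : PNode} {x : String} (hx : x ∉ pvKeys r) (q : List String) :
    ∀ pv ∈ pvLeaves r, (!decide ((x :: q) <+: pv.1)) = true := by
  intro pv hpv
  obtain ⟨k', rest', h1, h2⟩ := pvLeaves_shape r pv hpv
  simp only [Bool.not_eq_eq_eq_not, Bool.not_true, decide_eq_false_iff_not]
  rw [h1, List.cons_prefix_cons]
  rintro ⟨rfl, -⟩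
  exact hx h2

theorem pvLeaves_set_leaf : ∀ (t : PNode) (x v : String), pvWf t = true →
    t.leafVal? = none →
    (pvLeaves (t.set x (.leaf v))).Perm
      (((pvLeaves t).filter (fun pv => !decide ([x] <+: pv.1))) ++ [([x], v)]) := by
  intro t x v hwf hl
  induction t with
  | leaf w => simp [PNode.leafVal?] at hl
  | nil => simp [PNode.set, pvLeaves, PNode.leafVal?]
  | cons k c r ihc ihr =>
    rw [pvWf] at hwf
    simp only [Bool.and_eq_true, decide_eq_true_eq] at hwf
    obtain ⟨⟨⟨⟨hk, hcn⟩, hrl⟩, hwc⟩, hwr⟩ := hwf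
    rw [PNode.set]
    by_cases hkx : k = x
    · subst hkx
      rw [if_pos rfl, pvLeaves_cons_eq, pvLeaves_cons_eq, List.filter_append]
      have hkill : (pvChunkC k c).filter (fun pv => !decide ([k] <+: pv.1)) = [] := by
        rw [List.filter_eq_nil_iff]
        intro pv hpv
        obtain ⟨rest, hrest⟩ := pvChunk_head k c pv hpv
        simp [hrest, List.cons_prefix_cons]
      have hkeep : (pvLeaves r).filter (fun pv => !decide ([k] <+: pv.1)) = pvLeaves r := by
        refine List.filter_eq_self.mpr ?_
        intro pv hpv
        have := pvRest_not_prefix hk ([] : List String) pv hpv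
        simpa using this
      rw [hkill, hkeep]
      have hch : pvChunkC k (.leaf v) = [([k], v)] := rfl
      rw [hch, List.nil_append]
      exact List.perm_append_comm
    · rw [if_neg hkx, pvLeaves_cons_eq, pvLeaves_cons_eq, List.filter_append,
        pvChunk_keep hkx c [], List.append_assoc]
      exact List.Perm.append_left _ (ihr hwr hrl)

theorem pvLeaves_set_dict_new : ∀ (t : PNode) (x : String) (c : PNode), pvWf t = true →
    t.leafVal? = none → t.get? x = none → c.leafVal? = none →
    pvLeaves (t.set x c) = pvLeaves t ++ (pvLeaves c).map (fun pv => (x :: pv.1, pv.2)) := by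
  intro t x c hwf hl hg hcl
  induction t with
  | leaf w => simp [PNode.leafVal?] at hl
  | nil =>
    rw [PNode.set, pvLeaves_cons_eq, pvChunkC, hcl]
    simp [pvLeaves]
  | cons k c' r ihc ihr =>
    rw [pvWf] at hwf
    simp only [Bool.and_eq_true, decide_eq_true_eq] at hwf
    obtain ⟨⟨⟨⟨hk, hcn⟩, hrl⟩, hwc⟩, hwr⟩ := hwf
    rw [PNode.get?] at hg
    by_cases hkx : k = x
    · rw [if_pos hkx] at hg; exact absurd hg (by simp)
    · rw [if_neg hkx] at hg
      rw [PNode.set, if_neg hkx, pvLeaves_cons_eq, pvLeaves_cons_eq, ihr hwr hrl hg,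
        List.append_assoc]

theorem pvLeaves_modifyAt_perm : ∀ (t : PNode) (x : String) (c0 : PNode)
    (rest : List String) (v : String) (f : PNode → PNode), pvWf t = true →
    t.leafVal? = none → t.get? x = some c0 → c0.leafVal? = none →
    (f c0).leafVal? = none →
    (pvLeaves (f c0)).Perm ((pvLeaves c0).filter (fun pv => !decide (rest <+: pv.1)) ++ [(rest, v)]) →
    (pvLeaves (t.modifyAt x f)).Perm
      ((pvLeaves t).filter (fun pv => !decide ((x :: rest) <+: pv.1)) ++ [(x :: rest, v)]) := by
  intro t x c0 rest v f hwf hl hg hc0 hfl hfc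
  induction t with
  | leaf w => simp [PNode.leafVal?] at hl
  | nil => simp [PNode.get?] at hg
  | cons k c' r ihc ihr =>
    rw [pvWf] at hwf
    simp only [Bool.and_eq_true, decide_eq_true_eq] at hwf
    obtain ⟨⟨⟨⟨hk, hcn⟩, hrl⟩, hwc⟩, hwr⟩ := hwf
    rw [PNode.get?] at hg
    by_cases hkx : k = x
    · subst hkx
      rw [if_pos rfl] at hg
      injection hg with hg
      obtain rfl : c0 = c' := hg.symm
      rw [PNode.modifyAt, if_pos rfl, pvLeaves_cons_eq, pvLeaves_cons_eq, List.filter_append]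
      have hch1 : pvChunkC k (f c0) = (pvLeaves (f c0)).map (fun pv => (k :: pv.1, pv.2)) := by
        rw [pvChunkC, hfl]
      have hch2 : pvChunkC k c0 = (pvLeaves c0).map (fun pv => (k :: pv.1, pv.2)) := by
        rw [pvChunkC, hc0]
      have hkeep : (pvLeaves r).filter (fun pv => !decide ((k :: rest) <+: pv.1)) = pvLeaves r :=
        List.filter_eq_self.mpr (pvRest_not_prefix hk rest)
      rw [hch1, hch2, hkeep]
      have hfilt : ((pvLeaves c0).map (fun pv => (k :: pv.1, pv.2))).filter
            (fun pv => !decide ((k :: rest) <+: pv.1))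
          = ((pvLeaves c0).filter (fun pv => !decide (rest <+: pv.1))).map
            (fun pv => (k :: pv.1, pv.2)) := by
        rw [List.filter_map]
        congr 1
        refine List.filter_congr ?_
        intro pv _
        simp [Function.comp, List.cons_prefix_cons]
      rw [hfilt]
      refine List.Perm.trans (List.Perm.append_right _ (hfc.map _)) ?_
      rw [List.map_append]
      simp only [List.map_cons, List.map_nil]
      rw [List.append_assoc, List.append_assoc]
      exact List.Perm.append_left _ List.perm_append_comm
    · rw [if_neg hkx] at hg
      rw [PNode.modifyAt, if_neg hkx, pvLeaves_cons_eq, pvLeaves_cons_eq, List.filter_append,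
        pvChunk_keep hkx c' rest, List.append_assoc]
      exact List.Perm.append_left _ (ihr hwr hrl hg)

-- ---------- the single-insert permutation lemma ----------

theorem pvLeaf_mem_of_get?_leaf {t : PNode} {p w : String}
    (h : t.get? p = some (.leaf w)) : ([p], w) ∈ pvLeaves t := by
  have hm := pvGet?_some_mem h
  clear h
  induction t with
  | leaf v => simp [PNode.entries] at hm
  | nil => simp [PNode.entries] at hm
  | cons k c r ihc ihr =>
    rw [PNode.entries] at hm
    simp at hm
    rcases hm with ⟨h1, h2⟩ | hm
    · subst h1
      rw [pvLeaves_cons_eq, ← h2]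
      simp [pvChunkC, PNode.leafVal?]
    · rw [pvLeaves_cons_eq, List.mem_append]
      exact Or.inr (ihr hm)

theorem pvLift_mem : ∀ (t : PNode) (p : String) (c0 : PNode), t.get? p = some c0 →
    c0.leafVal? = none → ∀ pv ∈ pvLeaves c0, (p :: pv.1, pv.2) ∈ pvLeaves t := by
  intro t p c0 hg hc0l pv hpv
  induction t with
  | leaf w => simp [PNode.get?] at hg
  | nil => simp [PNode.get?] at hg
  | cons k c' r ihc ihr =>
    rw [PNode.get?] at hg
    by_cases hkx : k = p
    · subst hkx
      rw [if_pos rfl] at hg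
      injection hg with hg
      obtain rfl : c0 = c' := hg.symm
      rw [pvLeaves_cons_eq, List.mem_append, pvChunkC, hc0l]
      exact Or.inl (List.mem_map.mpr ⟨pv, hpv, rfl⟩)
    · rw [if_neg hkx] at hg
      rw [pvLeaves_cons_eq, List.mem_append]
      exact Or.inr (ihr hg)

theorem pvInsert_perm : ∀ (path : List String) (t : PNode) (v : String), path ≠ [] →
    pvWf t = true → t.leafVal? = none →
    (∀ pv ∈ pvLeaves t, ¬(pv.1 <+: path ∧ pv.1 ≠ path)) →
    (pvLeaves (pvInsert t path v)).Perm
      ((pvLeaves t).filter (fun pv => !decide (path <+: pv.1)) ++ [(path, v)]) := by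
  intro path
  induction path with
  | nil => intro t v h; exact absurd rfl h
  | cons p rest ih =>
    intro t v _ hwf hl hnp
    cases rest with
    | nil => exact pvLeaves_set_leaf t p v hwf hl
    | cons q rest' =>
      have hun : pvInsert t (p :: q :: rest') v
          = (if (t.get? p).isNone then t.set p .nil else t).modifyAt p
              (fun c => pvInsert c (q :: rest') v) := rfl
      cases hg : t.get? p with
      | none =>
        rw [hun, hg]
        simp only [Option.isNone_none, if_pos]
        rw [pvSet_modify_new hg]
        obtain ⟨hw1, hl1, _⟩ := pvInsert_wf (q :: rest') .nil v (by simp) (by rfl) (by rfl)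
        rw [pvLeaves_set_dict_new t p _ hwf hl hg hl1]
        have hrec := ih .nil v (by simp) (by rfl) (by rfl) (by simp [pvLeaves])
        have hleaves : (pvLeaves (pvInsert .nil (q :: rest') v)).Perm [(q :: rest', v)] := by
          simpa [pvLeaves] using hrec
        have hkeep : (pvLeaves t).filter (fun pv => !decide ((p :: q :: rest') <+: pv.1))
            = pvLeaves t := by
          refine List.filter_eq_self.mpr ?_
          intro pv hpv
          refine pvRest_not_prefix ?_ (q :: rest') pv hpv
          rw [← pvGet?_eq_none_iff]
          exact hg
        rw [hkeep]
        refine List.Perm.append_left _ ?_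
        have := hleaves.map (fun pv => ((p :: pv.1 : List String), pv.2))
        simpa using this
      | some c0 =>
        rw [hun, hg]
        simp only [Option.isNone_some, Bool.false_eq_true, ite_false]
        have hc0l : c0.leafVal? = none := by
          cases hc0 : c0 with
          | leaf w =>
            exfalso
            refine hnp ([p], w) (pvLeaf_mem_of_get?_leaf (hc0 ▸ hg)) ⟨?_, by simp⟩
            simp [List.cons_prefix_cons]
          | nil =>
            exfalso
            obtain ⟨-, hnn⟩ := pvWf_child hwf p c0 (pvGet?_some_mem hg)
            exact hnn hc0
          | cons _ _ _ => rfl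
        obtain ⟨hwc0, -⟩ := pvWf_child hwf p c0 (pvGet?_some_mem hg)
        obtain ⟨hw1, hl1, -⟩ := pvInsert_wf (q :: rest') c0 v (by simp) hwc0 hc0l
        refine pvLeaves_modifyAt_perm t p c0 (q :: rest') v _ hwf hl hg hc0l hl1 ?_
        refine ih c0 v (by simp) hwc0 hc0l ?_
        intro pv hpv hcontra
        have hmem : (p :: pv.1, pv.2) ∈ pvLeaves t := pvLift_mem t p c0 hg hc0l pv hpv
        refine hnp (p :: pv.1, pv.2) hmem ⟨?_, ?_⟩
        · rw [List.cons_prefix_cons]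
          exact ⟨rfl, hcontra.1⟩
        · simp only [ne_eq, List.cons.injEq, not_and]
          intro _
          exact fun hh => hcontra.2 (by simpa using hh)

-- ---------- folding all insertions: the tree's leaves are the surviving pairs ----------

theorem pvIsPrefixOf_eq_decide (q p : List String) :
    q.isPrefixOf p = decide (q <+: p) := by
  cases hb : q.isPrefixOf p with
  | true => simp [List.isPrefixOf_iff_prefix.mp hb]
  | false =>
    have : ¬ q <+: p := fun hc => by
      rw [List.isPrefixOf_iff_prefix.mpr hc] at hb
      exact Bool.true_eq_false.mp hb
    simp [this]

theorem pvFold : ∀ (ps : List (List String × String)) (t : PNode),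
    pvWf t = true → t.leafVal? = none →
    (∀ pv ∈ pvLeaves t, ∀ q ∈ ps, ¬(pv.1 <+: q.1 ∧ pv.1 ≠ q.1)) →
    ps.Pairwise (fun a b => ¬(a.1 <+: b.1 ∧ a.1 ≠ b.1)) →
    (∀ q ∈ ps, q.1 ≠ []) →
    (pvLeaves (ps.foldl (fun t pv => pvInsert t pv.1 pv.2) t)).Perm
        ((pvLeaves t).filter (fun pv => !(ps.any (fun q => q.1.isPrefixOf pv.1)))
          ++ pvSurvivors ps)
      ∧ pvWf (ps.foldl (fun t pv => pvInsert t pv.1 pv.2) t) = true := by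
  intro ps
  induction ps with
  | nil =>
    intro t hwf hl _ _ _
    refine ⟨?_, hwf⟩
    simp [pvSurvivors, List.filter_eq_self.mpr]
  | cons q ps ih =>
    intro t hwf hl hcond hps hne
    obtain ⟨hq1, hqs⟩ := List.pairwise_cons.mp hps
    have hqne : q.1 ≠ [] := hne q (by simp)
    obtain ⟨hw1, hl1, -⟩ := pvInsert_wf q.1 t q.2 hqne hwf hl
    have hperm1 := pvInsert_perm q.1 t q.2 hqne hwf hl
      (fun pv hpv => hcond pv hpv q (by simp))
    have hcond1 : ∀ pv ∈ pvLeaves (pvInsert t q.1 q.2), ∀ r ∈ ps,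
        ¬(pv.1 <+: r.1 ∧ pv.1 ≠ r.1) := by
      intro pv hpv r hr
      rw [hperm1.mem_iff, List.mem_append] at hpv
      rcases hpv with hpv | hpv
      · exact hcond pv (List.mem_of_mem_filter hpv) r (by simp [hr])
      · simp at hpv
        rw [hpv]
        exact hq1 r hr
    have hrec := ih (pvInsert t q.1 q.2) hw1 hl1 hcond1 hqs (fun r hr => hne r (by simp [hr]))
    rw [List.foldl_cons]
    refine ⟨?_, hrec.2⟩
    refine hrec.1.trans ?_
    have hfilt := List.Perm.filter (fun pv => !(ps.any (fun r => r.1.isPrefixOf pv.1))) hperm1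
    refine (List.Perm.append_right _ hfilt).trans ?_
    rw [List.filter_append, List.filter_filter]
    have hcomb : ∀ pv : List String × String,
        ((!ps.any fun r => r.1.isPrefixOf pv.1) && !decide (q.1 <+: pv.1))
          = !((q :: ps).any fun r => r.1.isPrefixOf pv.1) := by
      intro pv
      rw [List.any_cons, pvIsPrefixOf_eq_decide]
      cases hdec : decide (q.1 <+: pv.1) <;> simp
    rw [List.filter_congr (fun pv _ => hcomb pv)]
    rw [List.append_assoc]
    refine List.Perm.append_left _ ?_
    show ((List.filter (fun pv => !ps.any fun r => r.1.isPrefixOf pv.1) [(q.1, q.2)])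
        ++ pvSurvivors ps).Perm (pvSurvivors (q :: ps))
    have hsurv : pvSurvivors ((q.1, q.2) :: ps)
        = if ps.any (fun r => r.1.isPrefixOf q.1) then pvSurvivors ps
          else (q.1, q.2) :: pvSurvivors ps := rfl
    cases hguard : ps.any (fun r => r.1.isPrefixOf q.1) with
    | true => simp [List.filter, hguard, hsurv]
    | false => simp [List.filter, hguard, hsurv]

-- ---------- PySem.List.sorted does not depend on which List-order instance is used ----------

theorem pv_sorted_bridge {α : Type} (xs : List α) (key : α → List String) :
    @PySem.List.sorted α (List String) List.instLT (fun a b => a.decidableLT b) xs key false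
      = @PySem.List.sorted α (List String) List.instLinearOrder.toLT LinearOrder.toDecidableLT
          xs key false := by
  rw [@PySem.List.sorted_eq_foldl_insertBy α (List String) List.instLT
    (fun a b => a.decidableLT b) xs key]
  rw [@PySem.List.sorted_eq_foldl_insertBy α (List String) List.instLinearOrder.toLT
    LinearOrder.toDecidableLT xs key]
  congr 1
  funext acc x
  congr 1
  funext a b
  rw [decide_eq_decide]

-- ---------- the shared formatting tail ----------

theorem pv_tail_lists (K : Int) (rows : List (Nat × String × String)) :
    List.zipWith (fun k v => k ++ " " ++ v)
      ((rows.map (fun r => pvSpaces r.1 ++ r.2.1)).map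
        (fun k => k ++ pvSpaces (max (K - PySem.Str.len k) 0).toNat))
      (rows.map (fun r => r.2.2))
    = (rows.map pvRow).map
        (fun r => r.1 ++ pvSpaces (K - PySem.Str.len r.1).toNat ++ " " ++ r.2) := by
  induction rows with
  | nil => rfl
  | cons r rows ih =>
    simp only [List.map_cons, List.zipWith_cons_cons, ih, pvRow]
    have hmax : (max (K - PySem.Str.len (pvSpaces r.1 ++ r.2.1)) 0).toNat
        = (K - PySem.Str.len (pvSpaces r.1 ++ r.2.1)).toNat := by omega
    rw [hmax]

theorem treeformat_spec : Claim_equal_treeformat := by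
  intro pairs _ hpre
  unfold Spec_treeformat
  by_cases hlen : pairs.length = 0
  · rw [treeformat, treeformat_alt, if_pos hlen, if_pos hlen]
  · rw [treeformat, treeformat_alt, if_neg hlen, if_neg hlen]
    simp only
    have hfold0 : pairs.foldl
        (fun t kv => pvInsert t ((PySem.Str.split? kv.1 ".").getD []) kv.2) PNode.nil
        = (pairs.map pvSplitPair).foldl (fun t pv => pvInsert t pv.1 pv.2) PNode.nil := by
      rw [List.foldl_map]
      rfl
    have hpairwise : (pairs.map pvSplitPair).Pairwise
        (fun a b => ¬(a.1 <+: b.1 ∧ a.1 ≠ b.1)) := by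
      rw [List.pairwise_map]
      exact hpre
    have hne : ∀ q ∈ pairs.map pvSplitPair, q.1 ≠ [] := by
      intro q hq
      rw [List.mem_map] at hq
      obtain ⟨kv, _, rfl⟩ := hq
      exact pvPath_ne_nil kv.1
    have hfold := pvFold (pairs.map pvSplitPair) .nil (by rfl) (by rfl)
      (by simp [pvLeaves]) hpairwise hne
    set tree := (pairs.map pvSplitPair).foldl (fun t pv => pvInsert t pv.1 pv.2) PNode.nil
      with htree
    have htperm : (pvLeaves tree).Perm (pvSurvivors (pairs.map pvSplitPair)) := by
      have := hfold.1
      simpa [pvLeaves] using this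
    have hwtree : pvWf tree = true := hfold.2
    have hsorted : @PySem.List.sorted _ _ List.instLT (fun a b => a.decidableLT b)
        (pvSurvivors (pairs.map pvSplitPair)) (fun pv => pv.1) false = pvLeavesS tree := by
      rw [pv_sorted_bridge]
      exact PySem.List.sorted_eq_of_perm_of_pairwise_lt _ _
        (fun pv : List String × String => pv.1)
        ((pvLeavesS_perm tree).trans htperm)
        (pvLeavesS_pairwise tree.size tree le_rfl hwtree)
    have hemit : pvEmit (pvLeavesS tree) [] = (pvTraverse tree 0).map pvRow := by
      have h := pvMain tree.size tree le_rfl hwtree []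
      have habs : pvAbs [] = id := by
        funext pv
        simp [pvAbs]
      rw [habs, List.map_id] at h
      simpa using h
    rw [hfold0, hsorted, hemit]
    have hklen : (((pvTraverse tree 0).map (fun r => pvSpaces r.1 ++ r.2.1)).map
          PySem.Str.len).foldl max 0
        = (((pvTraverse tree 0).map pvRow).map (fun r => PySem.Str.len r.1)).foldl max 0 := by
      rw [List.map_map, List.map_map]
      rfl
    rw [hklen, pv_tail_lists]
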